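-- pv_equiv track=rewrite | github.com/ddeer1109/Hangman | hangman_solo_trial.py | extract_elements_by_difficulty
-- ===== SOURCE A (Python) =====
-- def extract_elements_by_difficulty(list_of_words, difficulty):
--     if difficulty == 0:
--         return [word for word in list_of_words if len(word) <= 5]
--
--     elif difficulty == 1:
--         return [word for word in list_of_words if (len(word) > 5 and len(word) <= 7)]
--
--     elif difficulty == 2:
--         return [word for word in list_of_words if (len(word) > 7 and len(word) <= 9)]
--
--     elif difficulty == 3:
--         return [word for word in list_of_words if (len(word) > 9 and len(word) <= 12)]
--
--     else:
--         return [word for word in list_of_words if len(word) > 12]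
-- ===== SOURCE B (Python) =====
-- def _bucket(n):
--     if n <= 5:
--         return 0
--     if n <= 7:
--         return 1
--     if n <= 9:
--         return 2
--     return 3 if n <= 12 else 4
--
--
-- def extract_elements_by_difficulty(list_of_words, difficulty):
--     # One partitioning pass: classify every word into its length bucket,
--     # then hand back the bucket asked for (unknown difficulties -> the >12 bucket).
--     buckets = ([], [], [], [], [])
--     for w in list_of_words:
--         buckets[_bucket(len(w))].append(w)
--     return buckets[difficulty if difficulty in (0, 1, 2, 3) else 4]
-- ===== Notes on version B (the rewrite author's own statement) =====
-- stated objective: alternative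
-- what changed: Replaces A's five-branch dispatch each running its own filter with a single group-by partitioning pass that classifies every word into one of five length buckets and then returns the bucket for the requested difficulty.
import Mathlib
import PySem

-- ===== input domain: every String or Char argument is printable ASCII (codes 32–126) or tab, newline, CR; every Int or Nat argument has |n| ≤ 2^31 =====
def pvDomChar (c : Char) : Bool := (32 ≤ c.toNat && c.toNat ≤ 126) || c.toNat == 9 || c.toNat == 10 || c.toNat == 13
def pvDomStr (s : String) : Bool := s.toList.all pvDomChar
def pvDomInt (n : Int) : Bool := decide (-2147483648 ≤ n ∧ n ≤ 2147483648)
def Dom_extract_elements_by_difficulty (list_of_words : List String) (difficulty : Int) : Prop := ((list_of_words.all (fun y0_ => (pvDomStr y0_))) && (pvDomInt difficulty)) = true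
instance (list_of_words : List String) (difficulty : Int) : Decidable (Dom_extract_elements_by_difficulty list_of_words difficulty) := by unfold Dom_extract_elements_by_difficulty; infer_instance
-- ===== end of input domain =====

-- B replaces A's five per-difficulty filters with one group-by partitioning pass into five length buckets (objective: alternative).

-- ===== PORT A =====
def extract_elements_by_difficulty (list_of_words : List String) (difficulty : Int) : List String :=
  if difficulty = 0 then
    list_of_words.filter (fun word => PySem.Str.len word ≤ 5)
  else if difficulty = 1 then
    list_of_words.filter (fun word => PySem.Str.len word > 5 && PySem.Str.len word ≤ 7)
  else if difficulty = 2 then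
    list_of_words.filter (fun word => PySem.Str.len word > 7 && PySem.Str.len word ≤ 9)
  else if difficulty = 3 then
    list_of_words.filter (fun word => PySem.Str.len word > 9 && PySem.Str.len word ≤ 12)
  else
    list_of_words.filter (fun word => PySem.Str.len word > 12)

-- ===== PORT B =====
-- helper _bucket from Source B
def pvBucket (n : Int) : Int :=
  if n ≤ 5 then 0
  else if n ≤ 7 then 1
  else if n ≤ 9 then 2
  else if n ≤ 12 then 3 else 4

-- state of the partitioning loop: the 5-tuple 'buckets'; append = acc ++ [w] (Python list.append order)
def pvStep (acc : List String × List String × List String × List String × List String)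
    (w : String) : List String × List String × List String × List String × List String :=
  let k := pvBucket (PySem.Str.len w)
  if k = 0 then (acc.1 ++ [w], acc.2.1, acc.2.2.1, acc.2.2.2.1, acc.2.2.2.2)
  else if k = 1 then (acc.1, acc.2.1 ++ [w], acc.2.2.1, acc.2.2.2.1, acc.2.2.2.2)
  else if k = 2 then (acc.1, acc.2.1, acc.2.2.1 ++ [w], acc.2.2.2.1, acc.2.2.2.2)
  else if k = 3 then (acc.1, acc.2.1, acc.2.2.1, acc.2.2.2.1 ++ [w], acc.2.2.2.2)
  else (acc.1, acc.2.1, acc.2.2.1, acc.2.2.2.1, acc.2.2.2.2 ++ [w])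

def extract_elements_by_difficulty_alt (list_of_words : List String) (difficulty : Int) : List String :=
  let buckets := list_of_words.foldl pvStep ([], [], [], [], [])
  let key : Int := if difficulty = 0 ∨ difficulty = 1 ∨ difficulty = 2 ∨ difficulty = 3 then difficulty else 4
  if key = 0 then buckets.1
  else if key = 1 then buckets.2.1
  else if key = 2 then buckets.2.2.1
  else if key = 3 then buckets.2.2.2.1
  else buckets.2.2.2.2

-- ===== PRECONDITION & SPEC =====
def Spec_extract_elements_by_difficulty (list_of_words : List String) (difficulty : Int) (out : List String) : Prop := out = extract_elements_by_difficulty_alt list_of_words difficulty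
instance (list_of_words : List String) (difficulty : Int) (out : List String) : Decidable (Spec_extract_elements_by_difficulty list_of_words difficulty out) := by unfold Spec_extract_elements_by_difficulty; infer_instance

-- ===== CLAIM (what is proved, stated in full; the proofs are below) =====
def Claim_equal_extract_elements_by_difficulty : Prop := ∀ (list_of_words : List String) (difficulty : Int), Dom_extract_elements_by_difficulty list_of_words difficulty → Spec_extract_elements_by_difficulty list_of_words difficulty (extract_elements_by_difficulty list_of_words difficulty)

-- ===== LEMMAS AND PROOFS =====
-- loop invariant: each bucket of the fold is its initial content ++ the words classified to it
theorem pv_fold_buckets (l : List String)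
    (a0 a1 a2 a3 a4 : List String) :
    l.foldl pvStep (a0, a1, a2, a3, a4) =
      (a0 ++ l.filter (fun w => pvBucket (PySem.Str.len w) = 0),
       a1 ++ l.filter (fun w => pvBucket (PySem.Str.len w) = 1),
       a2 ++ l.filter (fun w => pvBucket (PySem.Str.len w) = 2),
       a3 ++ l.filter (fun w => pvBucket (PySem.Str.len w) = 3),
       a4 ++ l.filter (fun w => pvBucket (PySem.Str.len w) = 4)) := by
  induction l generalizing a0 a1 a2 a3 a4 with
  | nil => simp
  | cons w l ih =>
    simp only [List.foldl_cons, List.filter_cons, PySem.Str.len_eq]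
    by_cases h0 : pvBucket ((w.length : Int)) = 0
    · simp [pvStep, PySem.Str.len_eq, h0, ih]
    · by_cases h1 : pvBucket ((w.length : Int)) = 1
      · simp [pvStep, PySem.Str.len_eq, h0, h1, ih]
      · by_cases h2 : pvBucket ((w.length : Int)) = 2
        · simp [pvStep, PySem.Str.len_eq, h0, h1, h2, ih]
        · by_cases h3 : pvBucket ((w.length : Int)) = 3
          · simp [pvStep, PySem.Str.len_eq, h0, h1, h2, h3, ih]
          · have h4 : pvBucket ((w.length : Int)) = 4 := by
              simp only [PySem.Str.len_eq, String.length_toList, pvBucket] at h0 h1 h2 h3 ⊢; split_ifs at * <;> omega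
            simp [pvStep, PySem.Str.len_eq, h0, h1, h2, h3, h4, ih]


-- ===== VERDICT (by name: the statement is the Claim_ definition above) =====
theorem extract_elements_by_difficulty_spec : Claim_equal_extract_elements_by_difficulty := by
  intro list_of_words difficulty _
  unfold Spec_extract_elements_by_difficulty extract_elements_by_difficulty
    extract_elements_by_difficulty_alt
  rw [pv_fold_buckets]
  by_cases h0 : difficulty = 0
  · subst h0
    simp only [if_pos rfl, if_pos (Or.inl rfl)]
    refine (List.filter_congr (fun w _ => ?_)).symm
    have : (0 : Int) ≤ (w.length : Int) := Int.natCast_nonneg _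
    simp only [PySem.Str.len_eq, String.length_toList, pvBucket, decide_eq_true_eq]
    split_ifs <;> simp <;> omega
  · by_cases h1 : difficulty = 1
    · subst h1
      simp only [h0, if_false, if_pos rfl, if_pos (Or.inr (Or.inl rfl)), if_neg (by decide : ¬(1 : Int) = 0)]
      refine (List.filter_congr (fun w _ => ?_)).symm
      simp only [PySem.Str.len_eq, String.length_toList, pvBucket, decide_eq_true_eq, Bool.and_eq_true]
      split_ifs <;> simp <;> omega
    · by_cases h2 : difficulty = 2
      · subst h2
        simp only [h0, h1, if_false, if_pos rfl, if_pos (Or.inr (Or.inr (Or.inl rfl))),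
          if_neg (by decide : ¬(2 : Int) = 0), if_neg (by decide : ¬(2 : Int) = 1)]
        refine (List.filter_congr (fun w _ => ?_)).symm
        simp only [PySem.Str.len_eq, String.length_toList, pvBucket, decide_eq_true_eq, Bool.and_eq_true]
        split_ifs <;> simp <;> omega
      · by_cases h3 : difficulty = 3
        · subst h3
          simp only [h0, h1, h2, if_false, if_pos rfl, if_pos (Or.inr (Or.inr (Or.inr rfl))),
            if_neg (by decide : ¬(3 : Int) = 0), if_neg (by decide : ¬(3 : Int) = 1),
            if_neg (by decide : ¬(3 : Int) = 2)]
          refine (List.filter_congr (fun w _ => ?_)).symm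
          simp only [PySem.Str.len_eq, String.length_toList, pvBucket, decide_eq_true_eq, Bool.and_eq_true]
          split_ifs <;> simp <;> omega
        · have hkey : ¬(difficulty = 0 ∨ difficulty = 1 ∨ difficulty = 2 ∨ difficulty = 3) := by
            tauto
          simp only [h0, h1, h2, h3, hkey, if_false,
            if_neg (by decide : ¬(4 : Int) = 0), if_neg (by decide : ¬(4 : Int) = 1),
            if_neg (by decide : ¬(4 : Int) = 2), if_neg (by decide : ¬(4 : Int) = 3)]
          refine (List.filter_congr (fun w _ => ?_)).symm
          simp only [PySem.Str.len_eq, String.length_toList, pvBucket, decide_eq_true_eq]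
          split_ifs <;> simp <;> omega
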